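-- pv_equiv track=rewrite | github.com/Phamtien19122002/do-an-ra-truong | TC_spec/test_0101_spec.py | remove_even_sum_pairs
-- ===== SOURCE A (Python) =====
-- def remove_even_sum_pairs(arr):
--     stack = []
--     for num in arr:
--         if stack and (stack[-1] + num) % 2 == 0:
--             stack.pop()
--         else:
--             stack.append(num)
--     return len(stack)
-- ===== SOURCE B (Python) =====
-- def remove_even_sum_pairs(arr):
--     count = 0
--     top = 0  # parity of the top of the conceptual stack (unused when count == 0)
--     for num in arr:
--         p = num % 2
--         if count > 0 and top == p:
--             count -= 1
--             top = 1 - p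
--         else:
--             count += 1
--             top = p
--     return count
-- ===== Notes on version B (the rewrite author's own statement) =====
-- stated objective: simpler
-- what changed: Replaces the explicit stack with two integers (count, top parity), using the invariant that the stack always alternates in parity, so its whole state is its length plus the parity of its top.
import Mathlib
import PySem

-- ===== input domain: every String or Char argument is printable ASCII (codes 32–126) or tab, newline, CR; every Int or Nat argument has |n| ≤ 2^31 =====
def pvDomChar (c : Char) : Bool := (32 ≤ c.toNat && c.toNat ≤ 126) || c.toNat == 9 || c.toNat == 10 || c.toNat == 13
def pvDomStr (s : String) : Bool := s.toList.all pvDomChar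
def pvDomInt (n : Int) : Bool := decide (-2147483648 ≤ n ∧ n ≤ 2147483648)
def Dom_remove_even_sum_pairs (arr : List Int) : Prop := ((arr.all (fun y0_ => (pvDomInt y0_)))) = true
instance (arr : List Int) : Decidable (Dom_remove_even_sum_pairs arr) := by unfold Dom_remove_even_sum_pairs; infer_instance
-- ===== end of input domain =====

-- B replaces A's explicit stack with two integers (count, top parity): the stack always
-- alternates in parity, so its whole state is its length and its top's parity (simpler, O(1) space).


-- ===== PORT A =====
-- A's loop: explicit stack (top at head), pop when (top + num) % 2 == 0, else push.
def pvStepA (stack : List Int) (num : Int) : List Int :=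
  match stack with
  | [] => [num]
  | top :: rest =>
      if PySem.Int.mod (top + num) 2 = 0 then rest else num :: top :: rest

def remove_even_sum_pairs (arr : List Int) : Int :=
  let stack := arr.foldl pvStepA []
  (stack.length : Int)

-- ===== PORT B =====
-- B's loop: the stack's whole state is (length, parity of top).
def pvStepB (st : Int × Int) (num : Int) : Int × Int :=
  let p := PySem.Int.mod num 2
  if st.1 > 0 ∧ st.2 = p then (st.1 - 1, 1 - p) else (st.1 + 1, p)

def remove_even_sum_pairs_alt (arr : List Int) : Int :=
  let st := arr.foldl pvStepB (0, 0)
  st.1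

-- ===== PRECONDITION & SPEC =====
def Spec_remove_even_sum_pairs (arr : List Int) (out : Int) : Prop := out = remove_even_sum_pairs_alt arr
instance (arr : List Int) (out : Int) : Decidable (Spec_remove_even_sum_pairs arr out) := by unfold Spec_remove_even_sum_pairs; infer_instance

-- ===== CLAIM (what is proved, stated in full; the proofs are below) =====
def Claim_equal_remove_even_sum_pairs : Prop := ∀ (arr : List Int), Dom_remove_even_sum_pairs arr → Spec_remove_even_sum_pairs arr (remove_even_sum_pairs arr)

-- ===== LEMMAS AND PROOFS =====

-- ===== VERDICT (by name: the statement is the Claim_ definition above) =====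

-- The loop invariant tying A's stack to B's (count, top-parity) pair:
-- count is the stack's length, the stack alternates in parity, and (if nonempty)
-- top is the parity of the stack's head.
def pvInv (stack : List Int) (st : Int × Int) : Prop :=
  st.1 = (stack.length : Int) ∧
  stack.IsChain (fun a b => a % 2 ≠ b % 2) ∧
  (∀ x xs, stack = x :: xs → st.2 = x % 2)

theorem pymod_two (x : Int) : PySem.Int.mod x 2 = x % 2 :=
  PySem.Int.mod_eq_emod_of_pos (by omega)

theorem pvInv_step (stack : List Int) (st : Int × Int) (num : Int)
    (h : pvInv stack st) : pvInv (pvStepA stack num) (pvStepB st num) := by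
  obtain ⟨hlen, hchain, htop⟩ := h
  match stack with
  | [] =>
    simp at hlen
    have hcond : ¬ (st.1 > 0 ∧ st.2 = PySem.Int.mod num 2) := by omega
    simp only [pvStepA, pvStepB, hcond, if_false]
    refine ⟨by simp [hlen], List.isChain_singleton num, ?_⟩
    intro x xs hx
    injection hx with h1 _
    simp [h1]
  | top :: rest =>
    have htop' : st.2 = top % 2 := htop top rest rfl
    simp only [pvStepA, pvStepB, pymod_two]
    by_cases hc : (top + num) % 2 = 0
    · have hpar : top % 2 = num % 2 := by omega
      have hcond : st.1 > 0 ∧ st.2 = num % 2 := by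
        refine ⟨by simp at hlen; omega, by rw [htop', hpar]⟩
      rw [if_pos hc, if_pos hcond]
      refine ⟨by simp at hlen ⊢; omega, hchain.tail, ?_⟩
      intro x xs hx
      subst hx
      have hne : top % 2 ≠ x % 2 := (List.isChain_cons_cons.mp hchain).1
      have h0 : x % 2 = 0 ∨ x % 2 = 1 := by omega
      have h1 : top % 2 = 0 ∨ top % 2 = 1 := by omega
      omega
    · have hpar : top % 2 ≠ num % 2 := by omega
      have hcond : ¬ (st.1 > 0 ∧ st.2 = num % 2) := by
        rintro ⟨-, h2⟩; rw [htop'] at h2; exact hpar h2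
      rw [if_neg hc, if_neg hcond]
      refine ⟨by simp at hlen ⊢; omega, ?_, ?_⟩
      · exact List.isChain_cons_cons.mpr ⟨fun h => hpar h.symm, hchain⟩
      · intro x xs hx
        injection hx with h1 _
        simp [h1]

theorem pvInv_foldl (arr : List Int) :
    ∀ (stack : List Int) (st : Int × Int), pvInv stack st →
    pvInv (arr.foldl pvStepA stack) (arr.foldl pvStepB st) := by
  induction arr with
  | nil => intro stack st h; exact h
  | cons num rest ih =>
    intro stack st h
    exact ih _ _ (pvInv_step stack st num h)

-- ===== VERDICT (by name: the statement is the Claim_ definition above) =====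
theorem remove_even_sum_pairs_spec : Claim_equal_remove_even_sum_pairs := by
  intro arr _
  unfold Spec_remove_even_sum_pairs remove_even_sum_pairs remove_even_sum_pairs_alt
  have h := pvInv_foldl arr [] (0, 0) ⟨by simp, by simp, by intro x xs h; cases h⟩
  exact h.1.symm
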